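-- pv_equiv track=rewrite | github.com/alephist/edabit-coding-challenges | python/sum_of_vowels.py | sum_of_vowels
-- ===== SOURCE A (Python) =====
-- def sum_of_vowels(sentence: str) -> int:
--     vowel_dict = {
--         'a': 4,
--         'e': 3,
--         'i': 1,
--         'o': 0,
--         'u': 0
--     }
--     return sum(vowel_dict.get(letter, 0) for letter in sentence.lower())
-- ===== SOURCE B (Python) =====
-- def sum_of_vowels(sentence: str) -> int:
--     def go(chars):
--         n = len(chars)
--         if n == 0:
--             return 0
--         if n == 1:
--             c = chars[0]
--             return 4 if c == 'a' else 3 if c == 'e' else 1 if c == 'i' else 0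
--         m = n // 2
--         return go(chars[:m]) + go(chars[m:])
--     return go(sentence.lower())
-- ===== Notes on version B (the rewrite author's own statement) =====
-- stated objective: alternative
-- what changed: Replaces A's single left-to-right accumulating pass with a dict lookup by a divide-and-conquer recursion that splits the lowercased string in half, recurses on both halves, and scores a single character with an if-chain (no dictionary); correct because the weighted sum is associative over concatenation.
import Mathlib
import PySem

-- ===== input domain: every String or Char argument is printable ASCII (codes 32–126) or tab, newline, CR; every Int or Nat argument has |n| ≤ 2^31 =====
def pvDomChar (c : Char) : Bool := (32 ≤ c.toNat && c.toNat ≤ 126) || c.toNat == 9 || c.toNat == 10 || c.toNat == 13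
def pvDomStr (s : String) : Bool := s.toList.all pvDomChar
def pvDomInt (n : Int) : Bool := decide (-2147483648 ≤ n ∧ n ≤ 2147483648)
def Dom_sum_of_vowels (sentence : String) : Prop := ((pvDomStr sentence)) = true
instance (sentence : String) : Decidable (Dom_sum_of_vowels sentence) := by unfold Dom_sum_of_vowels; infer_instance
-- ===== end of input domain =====

-- B replaces A's single accumulating dict-lookup pass by a divide-and-conquer
-- recursion on string halves with an if-chain for one character (alternative).

-- ===== PORT A =====
def sum_of_vowels (sentence : String) : Int :=
  let vowel_dict : PySem.Dict Char Int :=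
    (((((PySem.Dict.empty.insert 'a' 4).insert 'e' 3).insert 'i' 1).insert 'o' 0).insert 'u' 0)
  ((PySem.Str.lower sentence).toList.map (fun letter => vowel_dict.getD letter 0)).sum

-- ===== PORT B =====
-- the '4 if c == 'a' else …' chain for one character
def pvScoreB (c : Char) : Int :=
  if c = 'a' then 4 else if c = 'e' then 3 else if c = 'i' then 1 else 0

-- 'go': split-in-half recursion (chars[:m] / chars[m:] = take / drop)
def pvGoB (l : List Char) : Int :=
  if l.length = 0 then 0
  else if l.length = 1 then pvScoreB (l.headD ' ')
  else pvGoB (l.take (l.length / 2)) + pvGoB (l.drop (l.length / 2))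
termination_by l.length
decreasing_by
  · simp only [List.length_take]; omega
  · simp only [List.length_drop]; omega

def sum_of_vowels_alt (sentence : String) : Int :=
  pvGoB (PySem.Str.lower sentence).toList

-- ===== PRECONDITION & SPEC =====
def Spec_sum_of_vowels (sentence : String) (out : Int) : Prop := out = sum_of_vowels_alt sentence
instance (sentence : String) (out : Int) : Decidable (Spec_sum_of_vowels sentence out) := by unfold Spec_sum_of_vowels; infer_instance

-- ===== CLAIM (what is proved, stated in full; the proofs are below) =====
def Claim_equal_sum_of_vowels : Prop := ∀ (sentence : String), Dom_sum_of_vowels sentence → Spec_sum_of_vowels sentence (sum_of_vowels sentence)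

-- ===== LEMMAS AND PROOFS =====

-- The divide-and-conquer recursion computes the weighted sum of the whole list.
theorem pvGoB_eq_sum (l : List Char) : pvGoB l = (l.map pvScoreB).sum := by
  induction hn : l.length using Nat.strong_induction_on generalizing l with
  | _ n ih =>
    rw [pvGoB]
    by_cases h0 : l.length = 0
    · simp_all [List.length_eq_zero_iff.mp h0]
    · by_cases h1 : l.length = 1
      · obtain ⟨c, rfl⟩ : ∃ c, l = [c] := by
          match l, h1 with | [c], _ => exact ⟨c, rfl⟩
        simp
      · have ht : (l.take (l.length / 2)).length < n := by
          simp only [List.length_take]; omega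
        have hd : (l.drop (l.length / 2)).length < n := by
          simp only [List.length_drop]; omega
        rw [if_neg h0, if_neg h1, ih _ ht _ rfl, ih _ hd _ rfl,
            ← List.sum_append, ← List.map_append, List.take_append_drop]

-- A's dict lookup is B's if-chain score.
theorem dict_getD_eq_score (c : Char) :
    ((((((PySem.Dict.empty.insert 'a' (4:Int)).insert 'e' 3).insert 'i' 1).insert 'o' 0).insert 'u' 0)).getD c 0
    = pvScoreB c := by
  have hempty : (PySem.Dict.empty : PySem.Dict Char Int).getD c 0 = 0 := by
    simp [PySem.Dict.getD, PySem.Dict.get?, PySem.Dict.empty]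
  simp only [PySem.Dict.getD_insert, hempty, pvScoreB]
  split_ifs <;> simp_all

-- ===== VERDICT (by name: the statement is the Claim_ definition above) =====
theorem sum_of_vowels_spec : Claim_equal_sum_of_vowels := by
  intro sentence _
  unfold Spec_sum_of_vowels sum_of_vowels sum_of_vowels_alt
  rw [pvGoB_eq_sum]
  simp [dict_getD_eq_score]
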